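-- pv_equiv track=rewrite | github.com/santha22/PythonPrograms | GFG/Hasing/maximumBattalions.py | maximumBattalions
-- ===== SOURCE A (Python) =====
-- from typing import List
--
-- def maximumBattalions(n : int, names : List[str]) -> int:
--     # code here
--     mp = {}
--     ans = 0
--     finish = 0
--
--     for i in range(n):
--         if names[i] in mp:
--             mp[names[i]] = i
--
--         else:
--             mp[names[i]] = i
--
--
--     for i in range(n):
--         finish = max(finish, mp[names[i]])
--
--         if finish == i:
--             ans += 1
--
--     return ans
-- ===== SOURCE B (Python) =====
-- from typing import List
--
-- def maximumBattalions(n : int, names : List[str]) -> int: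
--     # Multiset counting: a cut after position i is valid iff no name is
--     # "open" (seen but not yet exhausted).  First count each name's total
--     # occurrences, then sweep once maintaining the number of open names.
--     total = {}
--     for i in range(n):
--         total[names[i]] = total.get(names[i], 0) + 1
--     seen = {}
--     open_names = 0
--     ans = 0
--     for i in range(n):
--         nm = names[i]
--         c = seen.get(nm, 0) + 1
--         seen[nm] = c
--         if c == 1:
--             open_names += 1
--         if c == total[nm]:
--             open_names -= 1
--         if open_names == 0:
--             ans += 1
--     return ans
-- ===== Notes on version B (the rewrite author's own statement) =====
-- stated objective: alternative
-- what changed: B never looks at occurrence indices at all: instead of A's last-occurrence-index dict and a running prefix-maximum compared to the loop index, B counts each name's total occurrences and sweeps once maintaining the number of currently 'open' names (seen but not exhausted), counting positions where that number drops to zero.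
import Mathlib
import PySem

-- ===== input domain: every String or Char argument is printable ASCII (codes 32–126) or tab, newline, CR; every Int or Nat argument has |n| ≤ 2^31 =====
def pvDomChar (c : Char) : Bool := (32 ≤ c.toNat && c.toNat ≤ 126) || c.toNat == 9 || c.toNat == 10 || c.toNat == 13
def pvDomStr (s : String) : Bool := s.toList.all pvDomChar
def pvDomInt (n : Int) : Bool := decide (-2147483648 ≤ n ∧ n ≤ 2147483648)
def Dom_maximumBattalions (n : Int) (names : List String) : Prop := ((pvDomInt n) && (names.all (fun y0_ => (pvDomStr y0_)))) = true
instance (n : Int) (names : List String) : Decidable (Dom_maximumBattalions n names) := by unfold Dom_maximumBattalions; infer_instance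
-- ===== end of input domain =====

-- B drops occurrence indices entirely: instead of A's last-occurrence dict and a running
-- prefix-maximum index, B counts each name's total occurrences and sweeps once maintaining
-- the number of currently open (seen but not exhausted) names, counting where it hits zero.

-- ===== PORT A =====
-- names[i] raises IndexError when i ≥ len(names); Pre_ excludes that, `.getD ""` totalizes.
-- mp[names[i]] in the second loop never raises: every key was inserted by the first loop.
def maximumBattalions (n : Int) (names : List String) : Int :=
  let mp : PySem.Dict String Int := (PySem.List.pyRange 0 n 1).foldl
    (fun mp i =>
      if mp.contains ((PySem.List.pyGet? names i).getD "") then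
        mp.insert ((PySem.List.pyGet? names i).getD "") i
      else
        mp.insert ((PySem.List.pyGet? names i).getD "") i)
    PySem.Dict.empty
  let r : Int × Int := (PySem.List.pyRange 0 n 1).foldl
    (fun (p : Int × Int) i =>
      let finish := max p.2 (mp.getD ((PySem.List.pyGet? names i).getD "") 0)
      (if finish = i then p.1 + 1 else p.1, finish))
    (0, 0)
  r.1

-- ===== PORT B =====
-- same indexing as A (names[i], Pre_ excludes the IndexError inputs); total[nm] in the
-- second loop never raises: both loops run over the same range(n), so `.getD _ 0` is exact.
def maximumBattalions_alt (n : Int) (names : List String) : Int :=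
  let total : PySem.Dict String Int := (PySem.List.pyRange 0 n 1).foldl
    (fun d i =>
      d.insert ((PySem.List.pyGet? names i).getD "")
        (d.getD ((PySem.List.pyGet? names i).getD "") 0 + 1))
    PySem.Dict.empty
  let r : PySem.Dict String Int × Int × Int := (PySem.List.pyRange 0 n 1).foldl
    (fun (st : PySem.Dict String Int × Int × Int) i =>
      let nm := (PySem.List.pyGet? names i).getD ""
      let c := st.1.getD nm 0 + 1
      let seen := st.1.insert nm c
      let o1 := if c = 1 then st.2.1 + 1 else st.2.1
      let o2 := if c = total.getD nm 0 then o1 - 1 else o1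
      (seen, o2, if o2 = 0 then st.2.2 + 1 else st.2.2))
    (PySem.Dict.empty, 0, 0)
  r.2.2

-- ===== PRECONDITION & SPEC =====
-- Pre_ excludes exactly the inputs where A raises IndexError: n larger than len(names).
def Pre_maximumBattalions (n : Int) (names : List String) : Prop := n ≤ (names.length : Int)
instance (n : Int) (names : List String) : Decidable (Pre_maximumBattalions n names) := by unfold Pre_maximumBattalions; infer_instance
def pvWitness_maximumBattalions : Int × List String := (3, ["a", "b", "a"])

def Spec_maximumBattalions (n : Int) (names : List String) (out : Int) : Prop := out = maximumBattalions_alt n names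
instance (n : Int) (names : List String) (out : Int) : Decidable (Spec_maximumBattalions n names out) := by unfold Spec_maximumBattalions; infer_instance

-- ===== CLAIM (what is proved, stated in full; the proofs are below) =====
def Claim_equal_maximumBattalions : Prop := ∀ (n : Int) (names : List String), Dom_maximumBattalions n names → Pre_maximumBattalions n names → Spec_maximumBattalions n names (maximumBattalions n names)

-- ===== LEMMAS AND PROOFS =====

def pvW (names : List String) (k : Nat) : String := (names[k]?).getD ""

-- ---- A-side model ----
def pvLastb (names : List String) : Nat → String → Int
  | 0, _ => 0
  | t+1, nm => if pvW names t = nm then (t : Int) else pvLastb names t nm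
def pvMaxA (names : List String) (m : Nat) : Nat → Int
  | 0 => 0
  | t+1 => max (pvMaxA names m t) (pvLastb names m (pvW names t))
def pvAcnt (names : List String) (m : Nat) : Nat → Int
  | 0 => 0
  | t+1 => if max (pvMaxA names m t) (pvLastb names m (pvW names t)) = (t : Int) then pvAcnt names m t + 1 else pvAcnt names m t

-- ---- B-side model ----
def pvCnt (names : List String) : Nat → String → Int
  | 0, _ => 0
  | t+1, nm => pvCnt names t nm + (if pvW names t = nm then 1 else 0)
def pvOpen (names : List String) (m : Nat) : Nat → Int
  | 0 => 0
  | t+1 =>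
      (if pvCnt names (t+1) (pvW names t) = 1 then pvOpen names m t + 1 else pvOpen names m t) -
      (if pvCnt names (t+1) (pvW names t) = pvCnt names m (pvW names t) then 1 else 0)
def pvBans (names : List String) (m : Nat) : Nat → Int
  | 0 => 0
  | t+1 => if pvOpen names m (t+1) = 0 then pvBans names m t + 1 else pvBans names m t

theorem pv_range_succ (t : Nat) :
    PySem.List.pyRange 0 ((t:Int)+1) 1 = PySem.List.pyRange 0 (t:Int) 1 ++ [(t:Int)] := by
  exact PySem.List.pyRange_one_succ_right (by positivity)

-- ---- port A = model ----
theorem pv_mp (names : List String) (t : Nat) (nm : String) :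
    ((PySem.List.pyRange 0 (t:Int) 1).foldl
      (fun d i => d.insert ((PySem.List.pyGet? names i).getD "") i) PySem.Dict.empty).getD nm 0
      = pvLastb names t nm := by
  induction t generalizing nm with
  | zero =>
    rw [show ((0:Nat):Int) = 0 by rfl, PySem.List.pyRange_one_eq_nil (by omega)]
    simp [pvLastb, PySem.Dict.getD_empty]
  | succ t ih =>
    rw [Nat.cast_succ, pv_range_succ, List.foldl_append, List.foldl_cons, List.foldl_nil]
    rw [PySem.Dict.getD_insert]
    simp only [PySem.List.pyGet?_natCast, pvLastb]
    by_cases h : pvW names t = nm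
    · have h' := h; simp only [pvW] at h'
      rw [if_pos h'.symm, if_pos h]
    · rw [if_neg h, if_neg, ih]
      intro hc; exact h (by simpa [pvW] using hc.symm)

theorem pv_loopA (names : List String) (m t : Nat)
    (mp : PySem.Dict String Int)
    (hmp : ∀ nm, mp.getD nm 0 = pvLastb names m nm) :
    (PySem.List.pyRange 0 (t:Int) 1).foldl
      (fun (p : Int × Int) i =>
        (if max p.2 (mp.getD ((PySem.List.pyGet? names i).getD "") 0) = i then p.1 + 1 else p.1,
          max p.2 (mp.getD ((PySem.List.pyGet? names i).getD "") 0))) (0, 0)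
      = (pvAcnt names m t, pvMaxA names m t) := by
  induction t with
  | zero =>
    rw [show ((0:Nat):Int) = 0 by rfl, PySem.List.pyRange_one_eq_nil (by omega)]
    simp [pvAcnt, pvMaxA]
  | succ t ih =>
    rw [Nat.cast_succ, pv_range_succ, List.foldl_append, ih, List.foldl_cons, List.foldl_nil]
    simp only [PySem.List.pyGet?_natCast, hmp, pvAcnt, pvMaxA, pvW]
    rfl

theorem pv_portA (names : List String) (m : Nat) :
    maximumBattalions (m : Int) names = pvAcnt names m m := by
  unfold maximumBattalions
  simp only [ite_self]
  rw [pv_loopA names m m _ (pv_mp names m)]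

-- ---- port B = model ----
theorem pv_total (names : List String) (t : Nat) (nm : String) :
    ((PySem.List.pyRange 0 (t:Int) 1).foldl
      (fun d i =>
        d.insert ((PySem.List.pyGet? names i).getD "")
          (d.getD ((PySem.List.pyGet? names i).getD "") 0 + 1)) PySem.Dict.empty).getD nm 0
      = pvCnt names t nm := by
  induction t generalizing nm with
  | zero =>
    rw [show ((0:Nat):Int) = 0 by rfl, PySem.List.pyRange_one_eq_nil (by omega)]
    simp [pvCnt, PySem.Dict.getD_empty]
  | succ t ih =>
    rw [Nat.cast_succ, pv_range_succ, List.foldl_append, List.foldl_cons, List.foldl_nil]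
    rw [PySem.Dict.getD_insert]
    simp only [PySem.List.pyGet?_natCast, pvCnt]
    by_cases h : pvW names t = nm
    · have h' := h; simp only [pvW] at h'
      rw [if_pos h'.symm, if_pos h, ih]
      have : pvW names t = (names[t]?).getD "" := rfl
      rw [← this, h]
    · rw [if_neg h, if_neg, ih]
      · ring
      · intro hc; exact h (by simpa [pvW] using hc.symm)

theorem pv_loopB (names : List String) (m : Nat)
    (tot : PySem.Dict String Int)
    (htot : ∀ nm, tot.getD nm 0 = pvCnt names m nm) (t : Nat) :
    ∃ d : PySem.Dict String Int,
      (PySem.List.pyRange 0 (t:Int) 1).foldl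
        (fun (st : PySem.Dict String Int × Int × Int) i =>
          let nm := (PySem.List.pyGet? names i).getD ""
          let c := st.1.getD nm 0 + 1
          let seen := st.1.insert nm c
          let o1 := if c = 1 then st.2.1 + 1 else st.2.1
          let o2 := if c = tot.getD nm 0 then o1 - 1 else o1
          (seen, o2, if o2 = 0 then st.2.2 + 1 else st.2.2))
        (PySem.Dict.empty, 0, 0)
      = (d, pvOpen names m t, pvBans names m t) ∧ ∀ nm, d.getD nm 0 = pvCnt names t nm := by
  induction t with
  | zero =>
    refine ⟨PySem.Dict.empty, ?_, ?_⟩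
    · rw [show ((0:Nat):Int) = 0 by rfl, PySem.List.pyRange_one_eq_nil (by omega)]
      simp [pvOpen, pvBans]
    · intro nm; simp [pvCnt, PySem.Dict.getD_empty]
  | succ t ih =>
    obtain ⟨d, hfold, hd⟩ := ih
    rw [Nat.cast_succ, pv_range_succ, List.foldl_append, hfold, List.foldl_cons, List.foldl_nil]
    simp only [PySem.List.pyGet?_natCast]
    have hnm : (names[(t:Nat)]?).getD "" = pvW names t := rfl
    rw [hnm]
    have hc : d.getD (pvW names t) 0 + 1 = pvCnt names (t+1) (pvW names t) := by
      rw [hd]; simp [pvCnt]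
    refine ⟨d.insert (pvW names t) (d.getD (pvW names t) 0 + 1), ?_, ?_⟩
    · simp only [hd, htot]
      have hc' : pvCnt names t (pvW names t) + 1 = pvCnt names (t+1) (pvW names t) := by
        simp [pvCnt]
      rw [hc']
      have ho : (if pvCnt names (t+1) (pvW names t) = pvCnt names m (pvW names t) then
            (if pvCnt names (t+1) (pvW names t) = 1 then pvOpen names m t + 1 else pvOpen names m t) - 1
          else (if pvCnt names (t+1) (pvW names t) = 1 then pvOpen names m t + 1 else pvOpen names m t))
          = pvOpen names m (t+1) := by
        simp only [pvOpen]
        by_cases h : pvCnt names (t+1) (pvW names t) = pvCnt names m (pvW names t) <;> simp [h]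
      rw [ho]
      simp only [pvBans]
    · intro nm
      rw [PySem.Dict.getD_insert]
      by_cases h : nm = pvW names t
      · rw [if_pos h, h, hc]
      · rw [if_neg h, hd]
        simp only [pvCnt]
        rw [if_neg (fun hc' => h hc'.symm)]
        ring

theorem pv_portB (names : List String) (m : Nat) :
    maximumBattalions_alt (m : Int) names = pvBans names m m := by
  unfold maximumBattalions_alt
  obtain ⟨d, hfold, _⟩ := pv_loopB names m _ (pv_total names m) m
  simp only []
  rw [hfold]

-- ---- pvCnt facts ----
theorem pv_cnt_nonneg (names : List String) (t : Nat) (nm : String) : 0 ≤ pvCnt names t nm := by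
  induction t with
  | zero => simp [pvCnt]
  | succ t ih => simp only [pvCnt]; split_ifs <;> omega

theorem pv_cnt_mono (names : List String) (t : Nat) (nm : String) :
    ∀ t', t ≤ t' → pvCnt names t nm ≤ pvCnt names t' nm := by
  intro t'
  induction t' with
  | zero => intro h; have h0 : t = 0 := by omega
            subst h0; exact le_refl _
  | succ t' ih =>
    intro h
    by_cases h' : t = t' + 1
    · subst h'; exact le_refl _
    · have h1 := ih (by omega)
      simp only [pvCnt]; split_ifs <;> omega

theorem pv_cnt_zero_iff (names : List String) (t : Nat) (nm : String) :
    pvCnt names t nm = 0 ↔ ∀ j, j < t → pvW names j ≠ nm := by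
  induction t with
  | zero => simp [pvCnt]
  | succ t ih =>
    simp only [pvCnt]
    constructor
    · intro h j hj
      have h0 := pv_cnt_nonneg names t nm
      have ht : pvCnt names t nm = 0 ∧ (if pvW names t = nm then (1:Int) else 0) = 0 := by
        split_ifs at h ⊢ <;> omega
      rcases Nat.lt_succ_iff_lt_or_eq.mp hj with h' | h'
      · exact ih.mp ht.1 j h'
      · subst h'; intro hw; rw [if_pos hw] at ht; omega
    · intro h
      rw [ih.mpr (fun j hj => h j (by omega)), if_neg (h t (by omega))]
      ring

theorem pv_cnt_eq_iff (names : List String) (t : Nat) (nm : String) : ∀ (m : Nat), t ≤ m →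
    (pvCnt names t nm = pvCnt names m nm ↔ ∀ k, t ≤ k → k < m → pvW names k ≠ nm) := by
  intro m
  induction m with
  | zero => intro h; have h0 : t = 0 := by omega
            subst h0; simp
  | succ m ih =>
    intro h
    by_cases h' : t = m + 1
    · subst h'
      constructor
      · intro _ k hk hkm; exact absurd hkm (by omega)
      · intro _; rfl
    · have hm := ih (by omega)
      have hmono := pv_cnt_mono names t nm m (by omega)
      simp only [pvCnt]
      constructor
      · intro he k hk hkm
        have hsplit : pvCnt names t nm = pvCnt names m nm ∧ (if pvW names m = nm then (1:Int) else 0) = 0 := by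
          split_ifs at he ⊢ <;> omega
        rcases Nat.lt_succ_iff_lt_or_eq.mp hkm with hk' | hk'
        · exact hm.mp hsplit.1 k hk hk'
        · subst hk'; intro hw; rw [if_pos hw] at hsplit; omega
      · intro hall
        rw [← hm.mpr (fun k hk hkm => hall k hk (by omega)),
            if_neg (hall m (by omega) (by omega))]
        ring

-- first occurrence exists
theorem pv_first_occ (names : List String) (t : Nat) (nm : String)
    (h : ∃ j, j < t ∧ pvW names j = nm) :
    ∃ j0, j0 < t ∧ pvW names j0 = nm ∧ pvCnt names j0 nm = 0 := by
  induction t with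
  | zero => obtain ⟨j, hj, _⟩ := h; omega
  | succ t ih =>
    by_cases hc : pvCnt names t nm = 0
    · obtain ⟨j, hj, hw⟩ := h
      have hjt : j = t := by
        by_contra hne
        exact (pv_cnt_zero_iff names t nm).mp hc j (by omega) hw
      subst hjt
      exact ⟨j, by omega, hw, hc⟩
    · have hex : ∃ j, j < t ∧ pvW names j = nm := by
        by_contra hno
        push_neg at hno
        exact hc ((pv_cnt_zero_iff names t nm).mpr (fun j hj hw => hno j hj hw))
      obtain ⟨j0, hj0, hw0, hc0⟩ := ih hex
      exact ⟨j0, by omega, hw0, hc0⟩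

-- countP of two predicates differing only at one index
theorem pv_countP_diff (p q : Nat → Bool) : ∀ (t j0 : Nat), j0 < t →
    (∀ j, j < t → j ≠ j0 → p j = q j) →
    ((List.range t).countP p : Int) = ((List.range t).countP q : Int)
      + (if p j0 then 1 else 0) - (if q j0 then 1 else 0) := by
  intro t
  induction t with
  | zero => intro j0 h; omega
  | succ t ih =>
    intro j0 hj0 hagree
    rw [List.range_succ, List.countP_append, List.countP_append]
    simp only [List.countP_cons, List.countP_nil]
    by_cases h : j0 = t
    · have hcongr : (List.range t).countP p = (List.range t).countP q := by
        apply List.countP_congr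
        intro j hj
        have hjt := List.mem_range.mp hj
        rw [hagree j (by omega) (by omega)]
      rw [hcongr, h]
      cases hp : p t <;> cases hq : q t <;> simp [hp, hq] <;> push_cast <;> omega
    · have hlt : j0 < t := by omega
      have hstep := ih j0 hlt (fun j hj hne => hagree j (by omega) hne)
      have hl : p t = q t := hagree t (by omega) (fun hc => h hc.symm)
      rw [hl]
      cases hq : q t <;> simp [hq] <;> push_cast at hstep ⊢ <;> omega

-- ---- pvOpen as a count ----
def pvOpenP (names : List String) (m t j : Nat) : Bool :=
  decide (pvCnt names (j+1) (pvW names j) = 1 ∧ pvCnt names t (pvW names j) < pvCnt names m (pvW names j))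

theorem pv_open_count (names : List String) (m : Nat) (t : Nat) (ht : t ≤ m) :
    pvOpen names m t = ((List.range t).countP (pvOpenP names m t) : Int) := by
  induction t with
  | zero => simp [pvOpen]
  | succ t ih =>
    have htm : t ≤ m := by omega
    have hstep : pvCnt names (t+1) (pvW names t) = pvCnt names t (pvW names t) + 1 := by
      simp [pvCnt]
    have hle : pvCnt names (t+1) (pvW names t) ≤ pvCnt names m (pvW names t) :=
      pv_cnt_mono names (t+1) (pvW names t) m (by omega)
    have hsum : ((List.range t).countP (pvOpenP names m (t+1)) : Int)
        = ((List.range t).countP (pvOpenP names m t) : Int)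
          - (if pvCnt names t (pvW names t) > 0 ∧
               pvCnt names (t+1) (pvW names t) = pvCnt names m (pvW names t) then 1 else 0) := by
      by_cases hz : pvCnt names t (pvW names t) = 0
      · have hcongr : (List.range t).countP (pvOpenP names m (t+1)) = (List.range t).countP (pvOpenP names m t) := by
          apply List.countP_congr
          intro j hj
          have hjt : j < t := List.mem_range.mp hj
          have hne : pvW names j ≠ pvW names t := (pv_cnt_zero_iff names t (pvW names t)).mp hz j hjt
          unfold pvOpenP
          have hcnt : pvCnt names (t+1) (pvW names j) = pvCnt names t (pvW names j) := by
            simp only [pvCnt]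
            rw [if_neg (fun hc => hne hc.symm)]; ring
          rw [hcnt]
        rw [hcongr]
        have hno : ¬ (pvCnt names t (pvW names t) > 0 ∧
            pvCnt names (t+1) (pvW names t) = pvCnt names m (pvW names t)) := by
          intro hcc; omega
        rw [if_neg hno]; ring
      · obtain ⟨j0, hj0, hw0, hc0⟩ := pv_first_occ names t (pvW names t) (by
          by_contra hno; push_neg at hno
          exact hz ((pv_cnt_zero_iff names t (pvW names t)).mpr hno))
        have hdiff : ∀ j, j < t → j ≠ j0 →
            pvOpenP names m (t+1) j = pvOpenP names m t j := by
          intro j hj hne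
          unfold pvOpenP
          by_cases hwj : pvW names j = pvW names t
          · have hfo : pvCnt names (j+1) (pvW names j) ≠ 1 := by
              rw [hwj]
              rcases Nat.lt_or_ge j j0 with hlt | hge
              · exact absurd hwj ((pv_cnt_zero_iff names j0 (pvW names t)).mp hc0 j hlt)
              · have hge' : j0 + 1 ≤ j := by omega
                have h1 : pvCnt names (j0+1) (pvW names t) = 1 := by
                  simp [pvCnt, hc0, hw0]
                have h2 : pvCnt names (j0+1) (pvW names t) ≤ pvCnt names j (pvW names t) :=
                  pv_cnt_mono names (j0+1) (pvW names t) j hge'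
                have h3 : pvCnt names (j+1) (pvW names t) = pvCnt names j (pvW names t) + 1 := by
                  simp [pvCnt, hwj]
                omega
            simp [hfo]
          · have hcnt : pvCnt names (t+1) (pvW names j) = pvCnt names t (pvW names j) := by
              simp only [pvCnt]
              rw [if_neg (fun hc => hwj hc.symm)]; ring
            rw [hcnt]
        have hP1 : pvOpenP names m (t+1) j0
            = decide (pvCnt names (t+1) (pvW names t) < pvCnt names m (pvW names t)) := by
          unfold pvOpenP
          rw [hw0]
          simp [pvCnt, hc0, hw0]
        have hP0 : pvOpenP names m t j0
            = decide (pvCnt names t (pvW names t) < pvCnt names m (pvW names t)) := by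
          unfold pvOpenP
          rw [hw0]
          simp [pvCnt, hc0, hw0]
        rw [pv_countP_diff (pvOpenP names m (t+1)) (pvOpenP names m t) t j0 hj0 hdiff, hP1, hP0]
        have hposz : pvCnt names t (pvW names t) > 0 := by
          have hnn := pv_cnt_nonneg names t (pvW names t); omega
        by_cases hfull : pvCnt names (t+1) (pvW names t) = pvCnt names m (pvW names t)
        · have h1 : ¬ pvCnt names (t+1) (pvW names t) < pvCnt names m (pvW names t) := by omega
          have h2 : pvCnt names t (pvW names t) < pvCnt names m (pvW names t) := by omega
          have hcp : pvCnt names t (pvW names t) > 0 ∧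
              pvCnt names (t+1) (pvW names t) = pvCnt names m (pvW names t) := ⟨hposz, hfull⟩
          rw [if_pos hcp]
          simp [h1, h2]
        · have h1 : pvCnt names (t+1) (pvW names t) < pvCnt names m (pvW names t) := by omega
          have h2 : pvCnt names t (pvW names t) < pvCnt names m (pvW names t) := by omega
          have hcn : ¬ (pvCnt names t (pvW names t) > 0 ∧
              pvCnt names (t+1) (pvW names t) = pvCnt names m (pvW names t)) := fun hcc => hfull hcc.2
          rw [if_neg hcn]
          simp [h1, h2]
    rw [List.range_succ, List.countP_append, List.countP_cons, List.countP_nil]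
    push_cast
    rw [hsum, ← ih htm]
    simp only [pvOpen]
    have hlast : pvOpenP names m (t+1) t
        = decide (pvCnt names (t+1) (pvW names t) = 1 ∧
            pvCnt names (t+1) (pvW names t) < pvCnt names m (pvW names t)) := rfl
    rw [hlast]
    have hnn := pv_cnt_nonneg names t (pvW names t)
    by_cases h1 : pvCnt names (t+1) (pvW names t) = 1 <;>
      by_cases h2 : pvCnt names (t+1) (pvW names t) = pvCnt names m (pvW names t)
    · have h3 : ¬ pvCnt names (t+1) (pvW names t) < pvCnt names m (pvW names t) := by omega
      have hcn : ¬ (pvCnt names t (pvW names t) > 0 ∧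
          pvCnt names (t+1) (pvW names t) = pvCnt names m (pvW names t)) := by
        intro hcc; omega
      rw [if_neg hcn]
      simp [h3, h1, h2]
      split_ifs <;> omega
    · have h3 : pvCnt names (t+1) (pvW names t) < pvCnt names m (pvW names t) := by omega
      have hcn : ¬ (pvCnt names t (pvW names t) > 0 ∧
          pvCnt names (t+1) (pvW names t) = pvCnt names m (pvW names t)) := by
        intro hcc; omega
      rw [if_neg hcn]
      simp [h3, h1, h2]
      split_ifs <;> omega
    · have h3 : ¬ (pvCnt names (t+1) (pvW names t) = 1 ∧
          pvCnt names (t+1) (pvW names t) < pvCnt names m (pvW names t)) := by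
        intro hcc; omega
      have hcp : pvCnt names t (pvW names t) > 0 ∧
          pvCnt names (t+1) (pvW names t) = pvCnt names m (pvW names t) := by
        constructor
        · omega
        · exact h2
      rw [if_pos hcp]
      simp [h3, h1, h2]
      omega
    · have h3 : ¬ (pvCnt names (t+1) (pvW names t) = 1 ∧
          pvCnt names (t+1) (pvW names t) < pvCnt names m (pvW names t)) := by
        intro hcc; omega
      have hcn : ¬ (pvCnt names t (pvW names t) > 0 ∧
          pvCnt names (t+1) (pvW names t) = pvCnt names m (pvW names t)) := by
        intro hcc; omega
      rw [if_neg hcn]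
      simp [h3, h1, h2]

theorem pv_open_zero_iff (names : List String) (m t : Nat) (ht : t ≤ m) :
    pvOpen names m t = 0 ↔ ∀ j, j < t → pvCnt names t (pvW names j) = pvCnt names m (pvW names j) := by
  rw [pv_open_count names m t ht]
  have hcount : ((List.range t).countP (pvOpenP names m t) : Int) = 0 ↔
      ∀ j ∈ List.range t, ¬ pvOpenP names m t j = true := by
    constructor
    · intro h
      have hnat : (List.range t).countP (pvOpenP names m t) = 0 := by exact_mod_cast h
      exact List.countP_eq_zero.mp hnat
    · intro h
      have hnat := List.countP_eq_zero.mpr h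
      exact_mod_cast hnat
  rw [hcount]
  constructor
  · intro h j hj
    have hle := pv_cnt_mono names t (pvW names j) m ht
    by_contra hne
    have hlt : pvCnt names t (pvW names j) < pvCnt names m (pvW names j) := by omega
    obtain ⟨j0, hj0, hw0, hc0⟩ := pv_first_occ names t (pvW names j) ⟨j, hj, rfl⟩
    have hth := h j0 (List.mem_range.mpr hj0)
    unfold pvOpenP at hth
    rw [hw0] at hth
    have h1 : pvCnt names (j0+1) (pvW names j) = 1 := by simp [pvCnt, hc0, hw0]
    simp [h1, hlt] at hth
  · intro h j hj
    have hjt := List.mem_range.mp hj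
    have hcnteq := h j hjt
    unfold pvOpenP
    simp only [decide_eq_true_eq, not_and]
    intro hx
    omega

-- ---- A-side characterization (from the previous analysis) ----
theorem pv_lastb_ge (names : List String) (t j : Nat) (nm : String)
    (hj : j < t) (hw : pvW names j = nm) : (j : Int) ≤ pvLastb names t nm := by
  induction t with
  | zero => omega
  | succ t ih =>
    simp only [pvLastb]
    by_cases h : pvW names t = nm
    · rw [if_pos h]; omega
    · rw [if_neg h]
      rcases Nat.lt_succ_iff_lt_or_eq.mp hj with h' | h'
      · exact ih h'
      · subst h'; exact absurd hw h

theorem pv_lastb_cases (names : List String) (t : Nat) (nm : String) :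
    pvLastb names t nm = 0 ∨ ∃ e, e < t ∧ pvLastb names t nm = (e : Int) ∧ pvW names e = nm := by
  induction t with
  | zero => left; rfl
  | succ t ih =>
    simp only [pvLastb]
    by_cases h : pvW names t = nm
    · right; exact ⟨t, by omega, by rw [if_pos h], h⟩
    · rw [if_neg h]
      rcases ih with h' | ⟨e, he, hv, hw⟩
      · left; exact h'
      · right; exact ⟨e, by omega, hv, hw⟩

theorem pv_maxA_le_iff (names : List String) (m t : Nat) (x : Int) (hx : 0 ≤ x) :
    pvMaxA names m t ≤ x ↔ ∀ j, j < t → pvLastb names m (pvW names j) ≤ x := by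
  induction t with
  | zero => simp [pvMaxA, hx]
  | succ t ih =>
    simp only [pvMaxA, max_le_iff, ih]
    constructor
    · rintro ⟨h1, h2⟩ j hj
      rcases Nat.lt_succ_iff_lt_or_eq.mp hj with h' | h'
      · exact h1 j h'
      · subst h'; exact h2
    · intro h
      exact ⟨fun j hj => h j (by omega), h t (by omega)⟩

-- Good m i: every name seen in [0..i] has all its prefix-m occurrences in [0..i]
theorem pv_condA_iff_good (names : List String) (m i : Nat) (hi : i < m) :
    (max (pvMaxA names m i) (pvLastb names m (pvW names i)) = (i : Int)) ↔
    (∀ j k, j ≤ i → k < m → pvW names k = pvW names j → k ≤ i) := by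
  constructor
  · intro h j k hj hk hw
    have hle : ∀ j', j' ≤ i → pvLastb names m (pvW names j') ≤ (i : Int) := by
      intro j' hj'
      rcases Nat.lt_or_ge j' i with h' | h'
      · exact (pv_maxA_le_iff names m i (i:Int) (by positivity)).mp
          (le_of_eq_of_le rfl (by rw [← h]; exact le_max_left _ _)) j' h'
      · have : j' = i := by omega
        subst this
        calc pvLastb names m (pvW names j') ≤ max (pvMaxA names m j') (pvLastb names m (pvW names j')) := le_max_right _ _
          _ = (j' : Int) := h
    have hk_le : (k : Int) ≤ pvLastb names m (pvW names j) := pv_lastb_ge names m k (pvW names j) hk hw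
    have := hle j hj
    omega
  · intro h
    have hub : ∀ j, j ≤ i → pvLastb names m (pvW names j) ≤ (i : Int) := by
      intro j hj
      rcases pv_lastb_cases names m (pvW names j) with h0 | ⟨e, he, hv, hw⟩
      · rw [h0]; positivity
      · rw [hv]
        exact_mod_cast Nat.cast_le.mpr (h j e hj he hw)
    have h1 : pvMaxA names m i ≤ (i : Int) :=
      (pv_maxA_le_iff names m i (i:Int) (by positivity)).mpr (fun j hj => hub j (by omega))
    have h2 : pvLastb names m (pvW names i) ≤ (i : Int) := hub i le_rfl
    have h3 : (i : Int) ≤ pvLastb names m (pvW names i) := pv_lastb_ge names m i (pvW names i) hi rfl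
    omega

-- B-side condition equals the same Good
theorem pv_condB_iff_good (names : List String) (m i : Nat) (hi : i < m) :
    (pvOpen names m (i+1) = 0) ↔
    (∀ j k, j ≤ i → k < m → pvW names k = pvW names j → k ≤ i) := by
  rw [pv_open_zero_iff names m (i+1) (by omega)]
  constructor
  · intro h j k hj hk hw
    have := (pv_cnt_eq_iff names (i+1) (pvW names j) m (by omega)).mp (h j (by omega))
    by_contra hgt
    exact this k (by omega) hk hw
  · intro h j hj
    apply (pv_cnt_eq_iff names (i+1) (pvW names j) m (by omega)).mpr
    intro k hk hkm hw
    have := h j k (by omega) hkm hw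
    omega

-- counts of the two models agree
theorem pv_acnt_count (names : List String) (m t : Nat) :
    pvAcnt names m t = ((List.range t).countP
      (fun i => decide (max (pvMaxA names m i) (pvLastb names m (pvW names i)) = (i : Int))) : Int) := by
  induction t with
  | zero => simp [pvAcnt]
  | succ t ih =>
    rw [List.range_succ, List.countP_append]
    simp only [pvAcnt, ih, List.countP_cons, List.countP_nil]
    by_cases h : max (pvMaxA names m t) (pvLastb names m (pvW names t)) = (t : Int)
    · simp [h]
    · simp [h]

theorem pv_bans_count (names : List String) (m t : Nat) :
    pvBans names m t = ((List.range t).countP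
      (fun i => decide (pvOpen names m (i+1) = 0)) : Int) := by
  induction t with
  | zero => simp [pvBans]
  | succ t ih =>
    rw [List.range_succ, List.countP_append]
    simp only [pvBans, ih, List.countP_cons, List.countP_nil]
    by_cases h : pvOpen names m (t+1) = 0
    · simp [h]
    · simp [h]

theorem pv_bridge (names : List String) (m : Nat) :
    pvAcnt names m m = pvBans names m m := by
  rw [pv_acnt_count, pv_bans_count]
  congr 1
  apply List.countP_congr
  intro i hi
  have him : i < m := List.mem_range.mp hi
  simp only [decide_eq_true_eq]
  rw [pv_condA_iff_good names m i him, pv_condB_iff_good names m i him]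

-- zero/negative n: both programs return 0
theorem pv_zeroA (n : Int) (names : List String) (h : n ≤ 0) :
    maximumBattalions n names = 0 := by
  unfold maximumBattalions
  simp only []
  rw [PySem.List.pyRange_one_eq_nil h]
  rfl

theorem pv_zeroB (n : Int) (names : List String) (h : n ≤ 0) :
    maximumBattalions_alt n names = 0 := by
  unfold maximumBattalions_alt
  simp only []
  rw [PySem.List.pyRange_one_eq_nil h]
  rfl

-- ===== VERDICT (by name: the statement is the Claim_ definition above) =====
theorem maximumBattalions_spec : Claim_equal_maximumBattalions := by
  intro n names _ _
  unfold Spec_maximumBattalions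
  by_cases h0 : 0 < n
  · have hn : n = ((n.toNat : Nat) : Int) := by omega
    rw [hn, pv_portA names n.toNat, pv_portB names n.toNat, pv_bridge]
  · rw [pv_zeroA n names (by omega), pv_zeroB n names (by omega)]
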